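-- pv_equiv track=rewrite | github.com/mohi16/aisec-cicd | tools/compute_ai_share.py | extract_code_lines_from_text
-- ===== SOURCE A (Python) =====
-- def extract_code_lines_from_text(text: str) -> list[str]:
--     """Extract code lines from a ChatGPT/Claude text export.
--     Looks for code blocks (``` delimited) and extracts their content."""
--     lines = []
--     in_code_block = False
--
--     for line in text.splitlines():
--         stripped = line.strip()
--         if stripped.startswith("```"):
--             in_code_block = not in_code_block
--             continue
--         if in_code_block:
--             # Skip trivial lines
--             if not stripped:
--                 continue
--             if stripped.startswith("import "):
--                 continue
--             if stripped.startswith("package "):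
--                 continue
--             if stripped in ("{", "}", ");", "});"):
--                 continue
--             lines.append(stripped)
--
--     # If no code blocks found, treat entire content as potential code
--     # (for raw Copilot suggestion files that are just code)
--     if not lines:
--         for line in text.splitlines():
--             stripped = line.strip()
--             if not stripped:
--                 continue
--             if stripped.startswith("import "):
--                 continue
--             if stripped.startswith("package "):
--                 continue
--             if stripped in ("{", "}", ");", "});"):
--                 continue
--             # Heuristic: line looks like code if it contains common patterns
--             if any(kw in stripped for kw in [
--                 "public ", "private ", "protected ", "class ", "interface ",
--                 "return ", "if (", "for (", "while (", "try {", "catch (",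
--                 "new ", "this.", "super.", "@", "=", "(", ".", ";"
--             ]):
--                 lines.append(stripped)
--
--     return lines
-- ===== SOURCE B (Python) =====
-- _KWS = ["public ", "private ", "protected ", "class ", "interface ",
--         "return ", "if (", "for (", "while (", "try {", "catch (",
--         "new ", "this.", "super.", "@", "=", "(", ".", ";"]
--
--
-- def _keep(s):
--     return bool(s) and not s.startswith("import ") and not s.startswith("package ") \
--         and s not in ("{", "}", ");", "});")
--
--
-- def _split_at_fences(strips):
--     """Split the stripped lines at ``` fence lines (fences themselves dropped)."""
--     done = []
--     cur = []
--     for s in strips: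
--         if s.startswith("```"):
--             done.append(cur)
--             cur = []
--         else:
--             cur.append(s)
--     done.append(cur)
--     return done
--
--
-- def _odd_segments(segs):
--     """Segments at odd positions: the ones inside code fences."""
--     out = []
--     rest = segs
--     while len(rest) >= 2:
--         out.append(rest[1])
--         rest = rest[2:]
--     return out
--
--
-- def extract_code_lines_from_text(text: str) -> list[str]:
--     strips = [ln.strip() for ln in text.splitlines()]
--     lines = [s for seg in _odd_segments(_split_at_fences(strips)) for s in seg if _keep(s)]
--     if not lines:
--         lines = [s for s in strips if _keep(s) and any(kw in s for kw in _KWS)]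
--     return lines
-- ===== Notes on version B (the rewrite author's own statement) =====
-- stated objective: alternative
-- what changed: A's single pass with a running in_code_block toggle is replaced by stripping all lines once, splitting the line list into segments at ``` fence lines, selecting every other (odd-positioned) segment as code and filtering it; the no-blocks fallback becomes a single comprehension over the pre-stripped lines.
import Mathlib
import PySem

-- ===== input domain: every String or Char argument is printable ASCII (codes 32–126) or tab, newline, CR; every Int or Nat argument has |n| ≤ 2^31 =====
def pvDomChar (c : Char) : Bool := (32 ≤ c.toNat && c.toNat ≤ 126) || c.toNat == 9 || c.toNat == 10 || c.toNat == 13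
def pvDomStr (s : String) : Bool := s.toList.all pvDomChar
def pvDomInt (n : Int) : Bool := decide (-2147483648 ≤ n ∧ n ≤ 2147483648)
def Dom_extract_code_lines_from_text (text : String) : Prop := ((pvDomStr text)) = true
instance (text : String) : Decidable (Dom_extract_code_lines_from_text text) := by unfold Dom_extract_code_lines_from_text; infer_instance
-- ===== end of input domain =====

-- B replaces A's running in_code_block toggle by split-at-fences then select-odd-segments; same cost, different decomposition.


-- ===== PORT A =====
def pvKws : List String := ["public ", "private ", "protected ", "class ", "interface ",
  "return ", "if (", "for (", "while (", "try {", "catch (",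
  "new ", "this.", "super.", "@", "=", "(", ".", ";"]

-- the body of A's first loop (state: collected lines, in_code_block flag)
def pvStepA (st : List String × Bool) (line : String) : List String × Bool :=
  let stripped := PySem.Str.strip line
  if PySem.Str.startswith stripped "```" then (st.1, !st.2)
  else if st.2 then
    if stripped = "" then st
    else if PySem.Str.startswith stripped "import " then st
    else if PySem.Str.startswith stripped "package " then st
    else if stripped = "{" ∨ stripped = "}" ∨ stripped = ");" ∨ stripped = "});" then st
    else (st.1 ++ [stripped], st.2)
  else st

-- the body of A's fallback loop
def pvFbStepA (acc : List String) (line : String) : List String :=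
  let stripped := PySem.Str.strip line
  if stripped = "" then acc
  else if PySem.Str.startswith stripped "import " then acc
  else if PySem.Str.startswith stripped "package " then acc
  else if stripped = "{" ∨ stripped = "}" ∨ stripped = ");" ∨ stripped = "});" then acc
  else if pvKws.any (fun kw => PySem.Str.isIn kw stripped) then acc ++ [stripped]
  else acc

def extract_code_lines_from_text (text : String) : List String :=
  let lines := ((PySem.Str.splitlines text).foldl pvStepA ([], false)).1
  if lines = [] then (PySem.Str.splitlines text).foldl pvFbStepA []
  else lines

-- ===== PORT B =====
def pvKeepB (s : String) : Bool :=
  !(s == "") && !(PySem.Str.startswith s "import ") && !(PySem.Str.startswith s "package ")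
    && !(s == "{" || s == "}" || s == ");" || s == "});")

-- split the stripped lines at ``` fence lines (fences themselves dropped)
def pvSplitAtFences (strips : List String) : List (List String) :=
  let p := strips.foldl
    (fun (st : List (List String) × List String) s =>
      if PySem.Str.startswith s "```" then (st.1 ++ [st.2], [])
      else (st.1, st.2 ++ [s]))
    ([], [])
  p.1 ++ [p.2]

-- segments at odd positions: the ones inside code fences (Source B's while-loop, rest = rest[2:])
def pvOddSegments : List (List String) → List (List String)
  | _ :: b :: rest => b :: pvOddSegments rest
  | _ => []

def extract_code_lines_from_text_alt (text : String) : List String :=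
  let strips := (PySem.Str.splitlines text).map PySem.Str.strip
  let lines := (pvOddSegments (pvSplitAtFences strips)).flatMap (fun seg => seg.filter pvKeepB)
  if lines = [] then
    strips.filter (fun s => pvKeepB s && pvKws.any (fun kw => PySem.Str.isIn kw s))
  else lines

-- ===== PRECONDITION & SPEC =====
def Spec_extract_code_lines_from_text (text : String) (out : List String) : Prop := out = extract_code_lines_from_text_alt text
instance (text : String) (out : List String) : Decidable (Spec_extract_code_lines_from_text text out) := by unfold Spec_extract_code_lines_from_text; infer_instance

-- ===== CLAIM (what is proved, stated in full; the proofs are below) =====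
def Claim_equal_extract_code_lines_from_text : Prop := ∀ (text : String), Dom_extract_code_lines_from_text text → Spec_extract_code_lines_from_text text (extract_code_lines_from_text text)

-- ===== LEMMAS AND PROOFS =====

-- structural (right-to-left) form of the fence split, for the proofs
def pvSplitRec : List String → List (List String)
  | [] => [[]]
  | s :: r =>
    if PySem.Str.startswith s "```" then [] :: pvSplitRec r
    else match pvSplitRec r with
      | g :: gs => (s :: g) :: gs
      | [] => [[s]]

lemma pvSplitRec_ne_nil (ls : List String) : pvSplitRec ls ≠ [] := by
  cases ls with
  | nil => simp [pvSplitRec]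
  | cons s r =>
    simp only [pvSplitRec]
    split_ifs
    · simp
    · cases pvSplitRec r <;> simp

def pvMapHead (f : List String → List String) : List (List String) → List (List String)
  | [] => []
  | g :: gs => f g :: gs

lemma pvSplit_foldl (ls : List String) : ∀ (done : List (List String)) (cur : List String),
    (ls.foldl (fun (st : List (List String) × List String) s =>
        if PySem.Str.startswith s "```" then (st.1 ++ [st.2], [])
        else (st.1, st.2 ++ [s])) (done, cur)).1
      ++ [(ls.foldl (fun (st : List (List String) × List String) s =>
        if PySem.Str.startswith s "```" then (st.1 ++ [st.2], [])
        else (st.1, st.2 ++ [s])) (done, cur)).2]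
    = done ++ pvMapHead (cur ++ ·) (pvSplitRec ls) := by
  induction ls with
  | nil => intro done cur; simp [pvSplitRec, pvMapHead]
  | cons s r ih =>
    intro done cur
    simp only [List.foldl_cons, pvSplitRec]
    by_cases h : PySem.Str.startswith s "```" = true
    · simp only [h, if_pos]
      rw [ih]
      cases pvSplitRec r <;> simp [pvMapHead]
    · simp only [h, if_false, Bool.false_eq_true]
      rw [ih]
      have hne := pvSplitRec_ne_nil r
      cases hrec : pvSplitRec r with
      | nil => exact absurd hrec hne
      | cons g gs => simp [pvMapHead]

-- A's flag-directed selection of segments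
def pvPick : Bool → List (List String) → List (List String)
  | _, [] => []
  | true, g :: gs => g :: pvPick false gs
  | false, _ :: gs => pvPick true gs

lemma pvOdd_eq_pick : ∀ segs, pvOddSegments segs = pvPick false segs := by
  intro segs
  induction segs using pvOddSegments.induct with
  | case1 a b rest ih => simp [pvOddSegments, pvPick, ih]
  | case2 segs h =>
    match segs with
    | [] => simp [pvOddSegments, pvPick]
    | [a] => simp [pvOddSegments, pvPick]
    | a :: b :: r => exact absurd rfl (h a b r)

-- step of A when inside a code block on a non-fence line: append iff pvKeepB holds
lemma pvStepA_true (acc : List String) (line : String)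
    (h : PySem.Str.startswith (PySem.Str.strip line) "```" = false) :
    pvStepA (acc, true) line
      = (acc ++ (if pvKeepB (PySem.Str.strip line) then [PySem.Str.strip line] else []), true) := by
  simp only [pvStepA, pvKeepB, h]
  split_ifs with h1 h2 h3 h4 <;>
    simp_all [Bool.and_eq_true, Bool.not_eq_true']

lemma pvLoopA_eq (ls : List String) : ∀ (acc : List String) (b : Bool),
    (ls.foldl pvStepA (acc, b)).1
      = acc ++ (pvPick b (pvSplitRec (ls.map PySem.Str.strip))).flatMap
          (fun seg => seg.filter pvKeepB) := by
  induction ls with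
  | nil =>
    intro acc b
    cases b <;> simp [pvSplitRec, pvPick]
  | cons s r ih =>
    intro acc b
    simp only [List.foldl_cons, List.map_cons, pvSplitRec]
    by_cases h : PySem.Str.startswith (PySem.Str.strip s) "```" = true
    · have h2 : PySem.Chars.startswith (PySem.Chars.strip s.toList) ['`', '`', '`'] = true := by
        simpa using h
      have hs : pvStepA (acc, b) s = (acc, !b) := by
        simp [pvStepA, h2]
      rw [hs, ih, h]
      cases b <;> simp [pvPick]
    · have hb : PySem.Str.startswith (PySem.Str.strip s) "```" = false := by
        simpa using h
      simp only [hb, Bool.false_eq_true, if_false]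
      have hne := pvSplitRec_ne_nil (r.map PySem.Str.strip)
      cases hrec : pvSplitRec (r.map PySem.Str.strip) with
      | nil => exact absurd hrec hne
      | cons g gs =>
        cases b with
        | false =>
          have hb2 : PySem.Chars.startswith (PySem.Chars.strip s.toList) ['`', '`', '`'] = false := by
            simpa using hb
          have hs : pvStepA (acc, false) s = (acc, false) := by
            simp [pvStepA, hb2]
          rw [hs, ih, hrec]
          simp [pvPick]
        | true =>
          rw [pvStepA_true acc s hb, ih, hrec]
          simp only [pvPick, List.flatMap_cons, List.filter_cons]
          by_cases hk : pvKeepB (PySem.Str.strip s) = true <;>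
            simp [hk, List.append_assoc]

-- A's fallback loop is the filter over the pre-stripped lines
lemma pvFb_eq (ls : List String) : ∀ (acc : List String),
    ls.foldl pvFbStepA acc
      = acc ++ (ls.map PySem.Str.strip).filter
          (fun s => pvKeepB s && pvKws.any (fun kw => PySem.Str.isIn kw s)) := by
  induction ls with
  | nil => intro acc; simp
  | cons s r ih =>
    intro acc
    simp only [List.foldl_cons, List.map_cons, List.filter_cons]
    rw [ih]
    have : pvFbStepA acc s
        = acc ++ (if (pvKeepB (PySem.Str.strip s)
              && pvKws.any (fun kw => PySem.Str.isIn kw (PySem.Str.strip s))) = true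
            then [PySem.Str.strip s] else []) := by
      simp only [pvFbStepA]
      split_ifs with h1 h2 h3 h4 h5 <;>
        simp_all [pvKeepB, List.any_eq_true, Bool.and_eq_true, Bool.not_eq_true']
      rename_i hall hex
      obtain ⟨x, hx, hx2⟩ := hex
      rw [hall x hx] at hx2
      simp at hx2
    rw [this]
    by_cases hk : (pvKeepB (PySem.Str.strip s)
        && pvKws.any (fun kw => PySem.Str.isIn kw (PySem.Str.strip s))) = true
    · rw [if_pos hk, if_pos hk]
      simp [List.append_assoc]
    · rw [if_neg hk, if_neg hk]
      simp

lemma pvSplitAtFences_eq (strips : List String) :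
    pvSplitAtFences strips = pvSplitRec strips := by
  have h := pvSplit_foldl strips [] []
  simp only [List.nil_append] at h
  have hne := pvSplitRec_ne_nil strips
  cases hrec : pvSplitRec strips with
  | nil => exact absurd hrec hne
  | cons g gs =>
    rw [hrec] at h
    simpa [pvSplitAtFences, pvMapHead] using h

lemma pvLines_eq (text : String) :
    ((PySem.Str.splitlines text).foldl pvStepA ([], false)).1
      = (pvOddSegments (pvSplitAtFences ((PySem.Str.splitlines text).map PySem.Str.strip))).flatMap
          (fun seg => seg.filter pvKeepB) := by
  rw [pvLoopA_eq, pvSplitAtFences_eq, pvOdd_eq_pick]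
  simp

-- ===== VERDICT (by name: the statement is the Claim_ definition above) =====
theorem extract_code_lines_from_text_spec : Claim_equal_extract_code_lines_from_text := by
  intro text _
  unfold Spec_extract_code_lines_from_text extract_code_lines_from_text extract_code_lines_from_text_alt
  rw [pvLines_eq text, pvFb_eq (PySem.Str.splitlines text) []]
  simp
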